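-- pv_equiv track=rewrite | github.com/XmchxUp/Kata | codewars/6kyu/Moves in squared strings (IV)/Moves in squared strings (IV).py | selfie_diag2_counterclock
-- ===== SOURCE A (Python) =====
-- def diag_2_sym(strng):
--     # your code
--     tmp = strng.split("\n")
--     n = len(tmp)
--     res = ""
--     for j in range(n - 1, -1, -1):
--         for i in range(n - 1, -1, -1):
--             res += tmp[i][j]
--         res += "\n"
--     return res[:-1]
--
-- def rot_90_counter(strng):
--     # your code
--     tmp = strng.split("\n")
--     n = len(tmp)
--     res = ""
--     for j in range(n - 1, -1, -1):
--         for i in range(n):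
--             res += tmp[i][j]
--         res += "\n"
--     return res[:-1]
--
-- def selfie_diag2_counterclock(strng):
--     # your code
--     return "\n".join(
--         [
--             x1 + "|" + x2 + "|" + x3
--             for x1, x2, x3 in zip(
--                 strng.split("\n"),
--                 diag_2_sym(strng).split("\n"),
--                 rot_90_counter(strng).split("\n"),
--             )
--         ]
--     )
-- ===== SOURCE B (Python) =====
-- def selfie_diag2_counterclock(strng):
--     rows = strng.split("\n")
--     n = len(rows)
--     # column j of the grid, built once; r[j] raises IndexError exactly where A does
--     cols = ["".join(r[j] for r in rows) for j in range(n)]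
--     diag2 = [c[::-1] for c in reversed(cols)]      # anti-diagonal symmetry = reversed columns, reversed order
--     rot = list(reversed(cols))                     # 90° counter-clockwise = columns in reversed order
--     return "\n".join(a + "|" + b + "|" + c for a, b, c in zip(rows, diag2, rot))
-- ===== Notes on version B (the rewrite author's own statement) =====
-- stated objective: idiomatic
-- what changed: B builds the list of grid columns once and obtains both transforms as list reversals of it (diag-2 = reversed columns in reversed order, rot-90-ccw = columns in reversed order), instead of A's reversed-index nested loops that build each transform as a newline-joined string and re-split it.
import Mathlib
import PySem

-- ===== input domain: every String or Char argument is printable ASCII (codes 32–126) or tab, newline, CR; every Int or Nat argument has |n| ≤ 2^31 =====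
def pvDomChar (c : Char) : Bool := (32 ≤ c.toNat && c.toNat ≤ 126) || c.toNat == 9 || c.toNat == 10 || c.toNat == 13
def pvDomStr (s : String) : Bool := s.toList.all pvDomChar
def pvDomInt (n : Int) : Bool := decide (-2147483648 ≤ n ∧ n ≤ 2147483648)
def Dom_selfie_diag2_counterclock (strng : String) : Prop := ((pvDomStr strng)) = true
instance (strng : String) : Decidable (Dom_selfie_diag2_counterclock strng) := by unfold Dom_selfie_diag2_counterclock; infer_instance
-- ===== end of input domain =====

-- B builds the grid's columns once and gets both transforms as list reversals of that column list;
-- A builds each transform character-by-character with reversed index loops and re-splits the joined string.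

-- ===== PORT A =====
def pvDiag2Sym (strng : String) : List Char :=
  let tmp := PySem.Chars.splitOn strng.toList ['\n']
  let n : Int := tmp.length
  let res := (PySem.List.pyRange (n - 1) (-1) (-1)).foldl (fun res j =>
      ((PySem.List.pyRange (n - 1) (-1) (-1)).foldl (fun res i =>
          res ++ [PySem.List.pyGetD (PySem.List.pyGetD tmp i ([] : List Char)) j ' ']) res) ++ ['\n']) []
  PySem.List.slice res none (some (-1))

def pvRot90Counter (strng : String) : List Char :=
  let tmp := PySem.Chars.splitOn strng.toList ['\n']
  let n : Int := tmp.length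
  let res := (PySem.List.pyRange (n - 1) (-1) (-1)).foldl (fun res j =>
      ((PySem.List.pyRange 0 n 1).foldl (fun res i =>
          res ++ [PySem.List.pyGetD (PySem.List.pyGetD tmp i ([] : List Char)) j ' ']) res) ++ ['\n']) []
  PySem.List.slice res none (some (-1))

def selfie_diag2_counterclock (strng : String) : String :=
  let x1s := PySem.Chars.splitOn strng.toList ['\n']
  let x2s := PySem.Chars.splitOn (pvDiag2Sym strng) ['\n']
  let x3s := PySem.Chars.splitOn (pvRot90Counter strng) ['\n']
  String.ofList (PySem.Chars.join ['\n']
    ((x1s.zip (x2s.zip x3s)).map (fun p => p.1 ++ ['|'] ++ p.2.1 ++ ['|'] ++ p.2.2)))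

-- ===== PORT B =====
def selfie_diag2_counterclock_alt (strng : String) : String :=
  let rows := PySem.Chars.splitOn strng.toList ['\n']
  let n : Int := rows.length
  let cols := (PySem.List.pyRange 0 n 1).map (fun j => rows.map (fun r => PySem.List.pyGetD r j ' '))
  let diag2 := cols.reverse.map List.reverse
  let rot := cols.reverse
  String.ofList (PySem.Chars.join ['\n']
    ((rows.zip (diag2.zip rot)).map (fun p => p.1 ++ ['|'] ++ p.2.1 ++ ['|'] ++ p.2.2)))

-- ===== PRECONDITION & SPEC =====
-- Pre_ excludes exactly the inputs on which Python A raises IndexError: grids in which some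
-- row is shorter than the number of rows (B raises IndexError on the same inputs).
def Pre_selfie_diag2_counterclock (strng : String) : Prop :=
  ∀ r ∈ PySem.Chars.splitOn strng.toList ['\n'],
    (PySem.Chars.splitOn strng.toList ['\n']).length ≤ r.length
instance (strng : String) : Decidable (Pre_selfie_diag2_counterclock strng) := by
  unfold Pre_selfie_diag2_counterclock; infer_instance

def pvWitness_selfie_diag2_counterclock : String := "ab\ncd"

def Spec_selfie_diag2_counterclock (strng : String) (out : String) : Prop := out = selfie_diag2_counterclock_alt strng
instance (strng : String) (out : String) : Decidable (Spec_selfie_diag2_counterclock strng out) := by unfold Spec_selfie_diag2_counterclock; infer_instance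

-- ===== CLAIM (what is proved, stated in full; the proofs are below) =====
def Claim_equal_selfie_diag2_counterclock : Prop := ∀ (strng : String), Dom_selfie_diag2_counterclock strng → Pre_selfie_diag2_counterclock strng → Spec_selfie_diag2_counterclock strng (selfie_diag2_counterclock strng)

-- ===== LEMMAS AND PROOFS =====

-- reference splitter: pvSplit pre l = the pieces of pre ++ l split on '\n', pre being the piece under construction
def pvSplit (pre : List Char) : List Char → List (List Char)
  | [] => [pre]
  | c :: rest => if c = '\n' then pre :: pvSplit [] rest else pvSplit (pre ++ [c]) rest

theorem pv_go_eq (fuel : Nat) :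
    ∀ (l : List Char), l.length < fuel → ∀ (cur : List Char) (acc : List (List Char)),
      PySem.Chars.splitOn.go ['\n'] fuel l cur acc = acc.reverse ++ pvSplit cur.reverse l := by
  induction fuel with
  | zero => intro l h; omega
  | succ f ih =>
    intro l h cur acc
    cases l with
    | nil =>
      rw [PySem.Chars.splitOn.go.eq_def]
      simp [pvSplit]
    | cons c rest =>
      have hlt : rest.length < f := by simp only [List.length_cons] at h; omega
      rw [PySem.Chars.splitOn.go.eq_def]
      by_cases hc : c = '\n'
      · subst hc
        simp [List.isPrefixOf, ih rest hlt, pvSplit]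
      · simp [List.isPrefixOf, hc, ih rest hlt, pvSplit]
        intro h'
        exact absurd h'.symm hc

theorem pv_splitOn_eq (s : List Char) : PySem.Chars.splitOn s ['\n'] = pvSplit [] s := by
  unfold PySem.Chars.splitOn
  rw [pv_go_eq (s.length + 1) s (by omega)]
  simp

theorem pvSplit_ne_nil (l : List Char) : ∀ pre, pvSplit pre l ≠ [] := by
  induction l with
  | nil => intro pre; simp [pvSplit]
  | cons c rest ih => intro pre; by_cases hc : c = '\n' <;> simp [pvSplit, hc, ih]

theorem pvSplit_no_nl (l : List Char) : ∀ pre, '\n' ∉ pre → ∀ p ∈ pvSplit pre l, '\n' ∉ p := by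
  induction l with
  | nil =>
    intro pre hp p hpm
    simp [pvSplit] at hpm; subst hpm; exact hp
  | cons c rest ih =>
    intro pre hp p hpm
    by_cases hc : c = '\n'
    · subst hc
      simp [pvSplit] at hpm
      rcases hpm with h | h
      · subst h; exact hp
      · exact ih [] (by simp) p h
    · simp only [pvSplit, if_neg hc] at hpm
      refine ih (pre ++ [c]) ?_ p hpm
      intro hmem
      rcases List.mem_append.mp hmem with h | h
      · exact hp h
      · simp at h; exact hc h.symm

theorem pvSplit_append (r : List Char) : ∀ (pre l : List Char), '\n' ∉ r →
    pvSplit pre (r ++ l) = pvSplit (pre ++ r) l := by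
  induction r with
  | nil => intro pre l _; simp
  | cons a rt ih =>
    intro pre l hr
    have ha : a ≠ '\n' := fun h => hr (by simp [h])
    have hrt : '\n' ∉ rt := fun h => hr (by simp [h])
    simp only [List.cons_append, pvSplit, if_neg ha]
    rw [ih (pre ++ [a]) l hrt]
    simp

theorem pvSplit_join (rs : List (List Char)) : ∀ (r pre : List Char),
    (∀ p ∈ r :: rs, '\n' ∉ p) →
    pvSplit pre (PySem.Chars.join ['\n'] (r :: rs)) = (pre ++ r) :: rs := by
  induction rs with
  | nil =>
    intro r pre h
    rw [PySem.Chars.join_singleton]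
    have := pvSplit_append r pre [] (h r (by simp))
    simpa [pvSplit] using this
  | cons q rest ih =>
    intro r pre h
    rw [PySem.Chars.join_cons_cons]
    have hsh : r ++ ['\n'] ++ PySem.Chars.join ['\n'] (q :: rest)
        = r ++ ('\n' :: PySem.Chars.join ['\n'] (q :: rest)) := by simp
    rw [hsh, pvSplit_append r pre _ (h r (by simp))]
    simp only [pvSplit, reduceIte]
    rw [ih q [] (fun p hp => h p (List.mem_cons_of_mem _ hp))]
    simp

theorem pv_dropLast_flatMap (rs : List (List Char)) : ∀ (r : List Char),
    ((r :: rs).flatMap (fun p => p ++ ['\n'])).dropLast = PySem.Chars.join ['\n'] (r :: rs) := by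
  induction rs with
  | nil => intro r; simp [PySem.Chars.join_singleton]
  | cons q rest ih =>
    intro r
    rw [PySem.Chars.join_cons_cons]
    have hne : ((q :: rest).flatMap (fun p => p ++ ['\n'])) ≠ [] := by simp
    calc ((r :: q :: rest).flatMap (fun p => p ++ ['\n'])).dropLast
        = ((r ++ ['\n']) ++ (q :: rest).flatMap (fun p => p ++ ['\n'])).dropLast := by
          simp [List.flatMap_cons]
      _ = (r ++ ['\n']) ++ ((q :: rest).flatMap (fun p => p ++ ['\n'])).dropLast :=
          List.dropLast_append_of_ne_nil hne
      _ = r ++ ['\n'] ++ PySem.Chars.join ['\n'] (q :: rest) := by rw [ih q]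

theorem pv_split_transform (rs : List (List Char)) (h : rs ≠ []) (hf : ∀ p ∈ rs, '\n' ∉ p) :
    PySem.Chars.splitOn ((rs.flatMap (fun p => p ++ ['\n'])).dropLast) ['\n'] = rs := by
  cases rs with
  | nil => exact absurd rfl h
  | cons r rest =>
    rw [pv_dropLast_flatMap rest r, pv_splitOn_eq, pvSplit_join rest r [] hf]
    simp

-- the column list both ports are really about
def pvCols (tmp : List (List Char)) : List (List Char) :=
  (PySem.List.pyRange 0 (tmp.length : Int) 1).map (fun j => tmp.map (fun r => PySem.List.pyGetD r j ' '))

theorem pv_splitOn_free (s : List Char) : ∀ r ∈ PySem.Chars.splitOn s ['\n'], '\n' ∉ r := by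
  rw [pv_splitOn_eq]; exact pvSplit_no_nl s [] (by simp)

theorem pv_splitOn_ne_nil (s : List Char) : PySem.Chars.splitOn s ['\n'] ≠ [] := by
  rw [pv_splitOn_eq]; exact pvSplit_ne_nil s []

theorem pv_js_ne_nil (n : Int) (h : 1 ≤ n) : PySem.List.pyRange 0 n 1 ≠ [] :=
  List.ne_nil_of_mem (PySem.List.mem_pyRange_one.mpr ⟨le_refl 0, by omega⟩)

theorem pv_cols_free (tmp : List (List Char)) (hfree : ∀ r ∈ tmp, '\n' ∉ r) :
    ∀ p ∈ pvCols tmp, '\n' ∉ p := by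
  intro p hp hnl
  unfold pvCols at hp
  rcases List.mem_map.mp hp with ⟨j, _, rfl⟩
  rcases List.mem_map.mp hnl with ⟨r, hr, hEq⟩
  unfold PySem.List.pyGetD at hEq
  cases hq : PySem.List.pyGet? r j with
  | none => rw [hq] at hEq; simp at hEq
  | some c =>
    rw [hq] at hEq; simp at hEq; subst hEq
    exact hfree r hr (PySem.List.mem_of_pyGet?_eq_some r hq)

theorem pv_range_rev (n : Int) :
    PySem.List.pyRange (n - 1) (-1) (-1) = (PySem.List.pyRange 0 n 1).reverse := by
  rw [PySem.List.pyRange_neg_one_eq_reverse]; norm_num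

theorem pv_inner_map (tmp : List (List Char)) (j : Int) :
    (PySem.List.pyRange 0 (tmp.length : Int) 1).map
        (fun i => PySem.List.pyGetD (PySem.List.pyGetD tmp i ([] : List Char)) j ' ')
      = tmp.map (fun r => PySem.List.pyGetD r j ' ') := by
  conv_rhs => rw [← PySem.List.map_pyGetD_pyRange_zero' tmp ([] : List Char)]
  rw [List.map_map]
  rfl

theorem pv_x3 (strng : String) :
    PySem.Chars.splitOn (pvRot90Counter strng) ['\n']
      = (pvCols (PySem.Chars.splitOn strng.toList ['\n'])).reverse := by
  unfold pvRot90Counter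
  set tmp := PySem.Chars.splitOn strng.toList ['\n'] with htmp
  dsimp only
  rw [pv_range_rev]
  have hin : ∀ (j : Int) (res : List Char),
      (PySem.List.pyRange 0 (tmp.length : Int) 1).foldl
          (fun res i => res ++ [PySem.List.pyGetD (PySem.List.pyGetD tmp i ([] : List Char)) j ' ']) res
        = res ++ tmp.map (fun r => PySem.List.pyGetD r j ' ') := by
    intro j res
    rw [PySem.List.foldl_append_singleton_eq_map, pv_inner_map]
  have hfun : (fun (res : List Char) (j : Int) =>
        ((PySem.List.pyRange 0 (tmp.length : Int) 1).foldl
          (fun res i => res ++ [PySem.List.pyGetD (PySem.List.pyGetD tmp i ([] : List Char)) j ' ']) res) ++ ['\n'])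
      = fun res j => res ++ (tmp.map (fun r => PySem.List.pyGetD r j ' ') ++ ['\n']) := by
    funext res j; rw [hin, List.append_assoc]
  rw [hfun, PySem.List.foldl_append_eq_flatMap, List.nil_append, PySem.List.slice_to_neg_one]
  have hflat : (PySem.List.pyRange 0 (tmp.length : Int) 1).reverse.flatMap
        (fun j => tmp.map (fun r => PySem.List.pyGetD r j ' ') ++ ['\n'])
      = ((pvCols tmp).reverse).flatMap (fun p => p ++ ['\n']) := by
    unfold pvCols
    rw [← List.map_reverse, List.flatMap_map]
  rw [hflat]
  have h1 : (1 : Int) ≤ (tmp.length : Int) := by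
    have := pv_splitOn_ne_nil strng.toList
    rw [← htmp] at this
    have := List.length_pos_of_ne_nil this
    omega
  refine pv_split_transform _ ?_ ?_
  · have : pvCols tmp ≠ [] := by
      unfold pvCols
      simp only [ne_eq, List.map_eq_nil_iff]
      exact pv_js_ne_nil _ h1
    simpa using this
  · intro p hp
    exact pv_cols_free tmp (by rw [htmp]; exact pv_splitOn_free strng.toList) p (List.mem_reverse.mp hp)

theorem pv_x2 (strng : String) :
    PySem.Chars.splitOn (pvDiag2Sym strng) ['\n']
      = ((pvCols (PySem.Chars.splitOn strng.toList ['\n'])).reverse).map List.reverse := by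
  unfold pvDiag2Sym
  set tmp := PySem.Chars.splitOn strng.toList ['\n'] with htmp
  dsimp only
  rw [pv_range_rev]
  have hin : ∀ (j : Int) (res : List Char),
      ((PySem.List.pyRange 0 (tmp.length : Int) 1).reverse).foldl
          (fun res i => res ++ [PySem.List.pyGetD (PySem.List.pyGetD tmp i ([] : List Char)) j ' ']) res
        = res ++ (tmp.map (fun r => PySem.List.pyGetD r j ' ')).reverse := by
    intro j res
    rw [PySem.List.foldl_append_singleton_eq_map, List.map_reverse, pv_inner_map]
  have hfun : (fun (res : List Char) (j : Int) =>
        (((PySem.List.pyRange 0 (tmp.length : Int) 1).reverse).foldl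
          (fun res i => res ++ [PySem.List.pyGetD (PySem.List.pyGetD tmp i ([] : List Char)) j ' ']) res) ++ ['\n'])
      = fun res j => res ++ ((tmp.map (fun r => PySem.List.pyGetD r j ' ')).reverse ++ ['\n']) := by
    funext res j; rw [hin, List.append_assoc]
  rw [hfun, PySem.List.foldl_append_eq_flatMap, List.nil_append, PySem.List.slice_to_neg_one]
  have hflat : (PySem.List.pyRange 0 (tmp.length : Int) 1).reverse.flatMap
        (fun j => (tmp.map (fun r => PySem.List.pyGetD r j ' ')).reverse ++ ['\n'])
      = (((pvCols tmp).reverse).map List.reverse).flatMap (fun p => p ++ ['\n']) := by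
    unfold pvCols
    rw [← List.map_reverse, List.flatMap_map, List.flatMap_map]
  rw [hflat]
  have h1 : (1 : Int) ≤ (tmp.length : Int) := by
    have := pv_splitOn_ne_nil strng.toList
    rw [← htmp] at this
    have := List.length_pos_of_ne_nil this
    omega
  refine pv_split_transform _ ?_ ?_
  · have : pvCols tmp ≠ [] := by
      unfold pvCols
      simp only [ne_eq, List.map_eq_nil_iff]
      exact pv_js_ne_nil _ h1
    simpa using this
  · intro p hp
    rcases List.mem_map.mp hp with ⟨q, hq, rfl⟩
    intro hnl
    exact pv_cols_free tmp (by rw [htmp]; exact pv_splitOn_free strng.toList) q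
      (List.mem_reverse.mp hq) (List.mem_reverse.mp hnl)

-- ===== VERDICT (by name: the statement is the Claim_ definition above) =====
theorem selfie_diag2_counterclock_spec : Claim_equal_selfie_diag2_counterclock := by
  intro strng _ _
  unfold Spec_selfie_diag2_counterclock
  simp only [selfie_diag2_counterclock, selfie_diag2_counterclock_alt]
  rw [pv_x2, pv_x3]
  simp only [pvCols]
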